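-- pv_equiv track=rewrite | github.com/anthonyKiggundu/Queuing-Theory | src/jockey_simulator.py | pose_updated
-- ===== SOURCE A (Python) =====
-- def pose_updated(still_in_queue, still_in_preferred_queue, customer_id):
--
--     customer_id = customer_id[0]
--     new_queue_poses = 0
--
--     if len(still_in_queue) > 0:
--         pose = 1
--         for customer in still_in_queue:
--             if customer == customer_id:
--                 new_queue_poses = pose
--             pose = pose + 1
--         #return new_queue_poses
--
--     if len(still_in_preferred_queue) > 0:
--         pose = 1
--         for customer in still_in_preferred_queue:
--             if customer == customer_id:
--                 new_queue_poses = pose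
--             pose = pose + 1
--
--     return new_queue_poses
-- ===== SOURCE B (Python) =====
-- def pose_updated(still_in_queue, still_in_preferred_queue, customer_id):
--     cid = customer_id[0]
--     # Merge both queues into one position-tagged sequence (regular queue first,
--     # preferred queue second), then take the FIRST match scanning from the back:
--     # the last preferred-queue position wins, then the last regular-queue position.
--     tagged = [(i + 1, c) for i, c in enumerate(still_in_queue)] \
--            + [(i + 1, c) for i, c in enumerate(still_in_preferred_queue)]
--     for pos, c in reversed(tagged):
--         if c == cid:
--             return pos
--     return 0
-- ===== Notes on version B (the rewrite author's own statement) =====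
-- stated objective: alternative
-- what changed: Instead of two per-queue forward scans each overwriting an accumulator on every match, B merges both queues into one position-tagged list and does a single backward scan with an early return at the first match (preferred queue sits at the back so its last match wins).
-- outside the precondition, e.g. on pose_updated([1, 2], [3], []): A raises IndexError, B raises IndexError
import Mathlib
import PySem

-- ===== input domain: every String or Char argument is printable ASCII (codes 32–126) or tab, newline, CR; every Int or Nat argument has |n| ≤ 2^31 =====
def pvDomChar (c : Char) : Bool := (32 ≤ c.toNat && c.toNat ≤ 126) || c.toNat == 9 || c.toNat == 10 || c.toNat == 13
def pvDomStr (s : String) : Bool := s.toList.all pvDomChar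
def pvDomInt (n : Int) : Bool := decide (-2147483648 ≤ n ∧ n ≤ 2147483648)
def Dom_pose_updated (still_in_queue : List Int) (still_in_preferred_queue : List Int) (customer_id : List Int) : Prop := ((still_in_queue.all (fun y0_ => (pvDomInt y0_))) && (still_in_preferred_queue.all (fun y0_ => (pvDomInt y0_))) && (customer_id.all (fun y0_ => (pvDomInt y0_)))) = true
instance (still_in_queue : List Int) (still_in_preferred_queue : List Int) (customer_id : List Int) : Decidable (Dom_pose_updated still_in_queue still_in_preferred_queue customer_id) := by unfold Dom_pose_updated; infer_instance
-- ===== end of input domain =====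

-- B replaces A's two accumulator-overwriting forward scans by one backward scan with early
-- return over a single position-tagged merge of both queues (objective: alternative, same cost).

-- ===== PORT A =====
-- A's per-queue loop: state (new_queue_poses, pose), pose is 1-based, every match overwrites.
def pvLoopA (cid : Int) (q : List Int) (init : Int × Int) : Int × Int :=
  q.foldl (fun s customer => (if customer = cid then s.2 else s.1, s.2 + 1)) init

def pose_updated (still_in_queue : List Int) (still_in_preferred_queue : List Int) (customer_id : List Int) : Int :=
  -- customer_id = customer_id[0]; Pre_ guarantees the list is non-empty (IndexError otherwise)
  let cid := customer_id.headI
  let new_queue_poses : Int := 0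
  let new_queue_poses :=
    if still_in_queue.length > 0 then (pvLoopA cid still_in_queue (new_queue_poses, 1)).1
    else new_queue_poses
  let new_queue_poses :=
    if still_in_preferred_queue.length > 0 then (pvLoopA cid still_in_preferred_queue (new_queue_poses, 1)).1
    else new_queue_poses
  new_queue_poses

-- ===== PORT B =====
-- [(i + 1, c) for i, c in enumerate(q)]
def pvTag (q : List Int) : List (Int × Int) :=
  (PySem.List.enumerate q).map (fun ic => (ic.1 + 1, ic.2))

-- the `for pos, c in reversed(tagged): if c == cid: return pos` loop, `return 0` after it
def pvScan (cid : Int) : List (Int × Int) → Int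
  | [] => 0
  | (p, c) :: rest => if c = cid then p else pvScan cid rest

def pose_updated_alt (still_in_queue : List Int) (still_in_preferred_queue : List Int) (customer_id : List Int) : Int :=
  let cid := customer_id.headI
  let tagged := pvTag still_in_queue ++ pvTag still_in_preferred_queue
  pvScan cid tagged.reverse

-- ===== PRECONDITION & SPEC =====
-- Pre_ excludes only customer_id = [], on which A raises IndexError at customer_id[0].
def Pre_pose_updated (still_in_queue : List Int) (still_in_preferred_queue : List Int) (customer_id : List Int) : Prop := customer_id ≠ []
instance (still_in_queue : List Int) (still_in_preferred_queue : List Int) (customer_id : List Int) : Decidable (Pre_pose_updated still_in_queue still_in_preferred_queue customer_id) := by unfold Pre_pose_updated; infer_instance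

def pvWitness_pose_updated : List Int × List Int × List Int := ([1, 2, 1], [3, 4], [1])

def Spec_pose_updated (still_in_queue : List Int) (still_in_preferred_queue : List Int) (customer_id : List Int) (out : Int) : Prop := out = pose_updated_alt still_in_queue still_in_preferred_queue customer_id
instance (still_in_queue : List Int) (still_in_preferred_queue : List Int) (customer_id : List Int) (out : Int) : Decidable (Spec_pose_updated still_in_queue still_in_preferred_queue customer_id out) := by unfold Spec_pose_updated; infer_instance

-- ===== CLAIM =====
def Claim_equal_pose_updated : Prop := ∀ (still_in_queue : List Int) (still_in_preferred_queue : List Int) (customer_id : List Int), Dom_pose_updated still_in_queue still_in_preferred_queue customer_id → Pre_pose_updated still_in_queue still_in_preferred_queue customer_id → Spec_pose_updated still_in_queue still_in_preferred_queue customer_id (pose_updated still_in_queue still_in_preferred_queue customer_id)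

-- ===== LEMMAS AND PROOFS =====

theorem pvScan_append (cid : Int) (a b : List (Int × Int)) :
    pvScan cid (a ++ b) = if cid ∈ a.map Prod.snd then pvScan cid a else pvScan cid b := by
  induction a with
  | nil => simp only [List.nil_append, List.map_nil, List.not_mem_nil, if_neg (fun h => h)]
  | cons pc rest ih =>
    obtain ⟨p, c⟩ := pc
    by_cases h : c = cid
    · subst h
      simp [pvScan]
    · have hm : (cid ∈ ((p, c) :: rest).map Prod.snd) ↔ cid ∈ rest.map Prod.snd := by
        simp [Ne.symm h]
      simp only [List.cons_append, pvScan, if_neg h, ih, hm]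

theorem pvScan_zero_of_not_mem (cid : Int) (l : List (Int × Int))
    (h : ∀ pc ∈ l, pc.2 ≠ cid) : pvScan cid l = 0 := by
  induction l with
  | nil => rfl
  | cons pc rest ih =>
    obtain ⟨p, c⟩ := pc
    have hc : c ≠ cid := h (p, c) (List.mem_cons_self ..)
    simp only [pvScan, if_neg hc]
    exact ih (fun q hq => h q (List.mem_cons_of_mem _ hq))

theorem pvTag_map_snd (q : List Int) : (pvTag q).map Prod.snd = q := by
  rw [pvTag, List.map_map]
  exact PySem.List.map_snd_enumerate q 0

theorem pvTag_rev_mem (cid : Int) (q : List Int) :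
    (cid ∈ ((pvTag q).reverse.map Prod.snd)) ↔ cid ∈ q := by
  simp [List.map_reverse, List.mem_reverse, pvTag_map_snd]

theorem pvTag_zero (cid : Int) (q : List Int) (h : cid ∉ q) :
    pvScan cid (pvTag q).reverse = 0 := by
  refine pvScan_zero_of_not_mem cid _ (fun pc hpc he => ?_)
  refine h ?_
  have : pc.2 ∈ (pvTag q).reverse.map Prod.snd := List.mem_map_of_mem hpc
  rw [he] at this
  exact (pvTag_rev_mem cid q).mp this

theorem pvTag_append_singleton (q : List Int) (x : Int) :
    pvTag (q ++ [x]) = pvTag q ++ [((q.length : Int) + 1, x)] := by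
  rw [pvTag, PySem.List.enumerate_append]
  simp [pvTag, PySem.List.enumerate_cons]

theorem pvLoopA_snd (cid : Int) (q : List Int) (init : Int × Int) :
    (pvLoopA cid q init).2 = init.2 + q.length := by
  induction q generalizing init with
  | nil => simp [pvLoopA]
  | cons y ys ih =>
    simp only [pvLoopA, List.foldl_cons, List.length_cons] at *
    rw [ih]; push_cast; ring

theorem pvLoopA_append_singleton (cid : Int) (q : List Int) (x : Int) (init : Int × Int) :
    pvLoopA cid (q ++ [x]) init =
      ((if x = cid then (pvLoopA cid q init).2 else (pvLoopA cid q init).1),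
       (pvLoopA cid q init).2 + 1) := by
  simp [pvLoopA, List.foldl_append]

-- A's guarded per-queue pass equals B's backward scan over the tagged queue (on a match)
theorem pvPass_eq (cid : Int) (q : List Int) (a : Int) :
    (if q.length > 0 then (pvLoopA cid q (a, 1)).1 else a)
      = if cid ∈ q then pvScan cid (pvTag q).reverse else a := by
  induction q using List.reverseRecOn generalizing a with
  | nil => simp
  | append_singleton q x ih =>
    have hs := pvLoopA_snd cid q (a, 1)
    rw [if_pos (by simp : (q ++ [x]).length > 0), pvTag_append_singleton, List.reverse_append,
      pvLoopA_append_singleton]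
    simp only [List.reverse_cons, List.reverse_nil, List.nil_append, List.singleton_append, pvScan]
    by_cases hx : x = cid
    · subst hx
      rw [if_pos rfl, if_pos rfl, if_pos (by simp : x ∈ q ++ [x]), hs]
      push_cast; ring
    · rw [if_neg hx, if_neg hx]
      have hmem : (cid ∈ q ++ [x]) ↔ cid ∈ q := by simp [Ne.symm hx]
      simp only [hmem]
      have hia := ih a
      by_cases h : cid ∈ q
      · have hql : q.length > 0 := List.length_pos_of_mem h
        rw [if_pos hql, if_pos h] at hia
        rw [if_pos h]
        exact hia
      · rw [if_neg h]
        by_cases hql : q.length > 0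
        · rw [if_pos hql, if_neg h] at hia
          exact hia
        · have hnil : q = [] := List.eq_nil_of_length_eq_zero (by omega)
          subst hnil
          simp [pvLoopA]

-- ===== VERDICT =====
theorem pose_updated_spec : Claim_equal_pose_updated := by
  intro sq pq cs _ _
  unfold Spec_pose_updated pose_updated pose_updated_alt
  simp only []
  rw [pvPass_eq, pvPass_eq, List.reverse_append, pvScan_append]
  by_cases hp : cs.headI ∈ pq
  · rw [if_pos hp, if_pos ((pvTag_rev_mem _ _).mpr hp)]
  · rw [if_neg hp, if_neg (fun h => hp ((pvTag_rev_mem _ _).mp h))]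
    by_cases hq : cs.headI ∈ sq
    · rw [if_pos hq]
    · rw [if_neg hq, pvTag_zero _ _ hq]
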